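-- pv_equiv track=rewrite | github.com/Edmundocabocolino/coleta-de-dados-do-jogo-double-da-blazer | coleta_de_dados.py | encontrar_intervalo_maximo
-- ===== SOURCE A (Python) =====
-- def encontrar_intervalo_maximo(dados_filtrados):
--     # Inicializa variáveis para armazenar os intervalos entre os zeros
--     intervalo_atual = 0
--     intervalo_maximo = 0
--
--     # Itera sobre os dados filtrados
--     for dado in dados_filtrados:
--         if dado == '0':
--             if intervalo_atual > intervalo_maximo:
--                 intervalo_maximo = intervalo_atual
--             intervalo_atual = 0
--         else:
--             intervalo_atual += 1
--
--     return intervalo_maximo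
-- ===== SOURCE B (Python) =====
-- def encontrar_intervalo_maximo(dados_filtrados):
--     # Index-table approach: positions of zeros, then gaps between consecutive zeros.
--     zeros = [i for i, d in enumerate(dados_filtrados) if d == '0']
--     melhor = 0
--     prev = -1
--     for p in zeros:
--         melhor = max(melhor, p - prev - 1)
--         prev = p
--     return melhor
-- ===== Notes on version B (the rewrite author's own statement) =====
-- stated objective: alternative
-- what changed: B first builds the list of zero positions, then takes the max gap between consecutive zero positions (previous starting at -1), instead of A's single running-counter scan.
import Mathlib
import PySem

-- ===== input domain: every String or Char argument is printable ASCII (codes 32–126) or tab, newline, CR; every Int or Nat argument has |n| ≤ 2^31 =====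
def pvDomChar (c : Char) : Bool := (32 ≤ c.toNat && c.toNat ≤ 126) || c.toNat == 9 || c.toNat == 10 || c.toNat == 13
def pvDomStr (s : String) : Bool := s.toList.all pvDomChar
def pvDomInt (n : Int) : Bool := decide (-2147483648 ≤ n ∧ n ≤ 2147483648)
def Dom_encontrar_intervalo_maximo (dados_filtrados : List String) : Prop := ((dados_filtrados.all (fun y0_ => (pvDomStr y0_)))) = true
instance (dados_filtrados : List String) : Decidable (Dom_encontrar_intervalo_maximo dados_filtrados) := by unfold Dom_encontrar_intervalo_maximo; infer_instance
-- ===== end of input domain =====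

-- B replaces A's running-counter scan by a zero-position index table and max gap between
-- consecutive zero positions (objective: alternative decomposition, same cost).

-- ===== PORT A =====
-- A's loop: state (intervalo_atual, intervalo_maximo); result is intervalo_maximo.
def encontrar_intervalo_maximo (dados_filtrados : List String) : Int :=
  (dados_filtrados.foldl
    (fun (s : Int × Int) dado =>
      if dado = "0" then (0, if s.1 > s.2 then s.1 else s.2)
      else (s.1 + 1, s.2))
    (0, 0)).2

-- ===== PORT B =====
-- the comprehension 'zeros = [i for i, d in enumerate(l) if d == "0"]', enumerated from n
def pvZerosFrom (n : Int) : List String → List Int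
  | [] => []
  | d :: t => if d = "0" then n :: pvZerosFrom (n + 1) t else pvZerosFrom (n + 1) t

def encontrar_intervalo_maximo_alt (dados_filtrados : List String) : Int :=
  ((pvZerosFrom 0 dados_filtrados).foldl
    (fun (s : Int × Int) p => (max s.1 (p - s.2 - 1), p))
    (0, -1)).1

-- ===== PRECONDITION & SPEC =====
def Spec_encontrar_intervalo_maximo (dados_filtrados : List String) (out : Int) : Prop := out = encontrar_intervalo_maximo_alt dados_filtrados
instance (dados_filtrados : List String) (out : Int) : Decidable (Spec_encontrar_intervalo_maximo dados_filtrados out) := by unfold Spec_encontrar_intervalo_maximo; infer_instance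

-- ===== CLAIM (what is proved, stated in full; the proofs are below) =====
def Claim_equal_encontrar_intervalo_maximo : Prop := ∀ (dados_filtrados : List String), Dom_encontrar_intervalo_maximo dados_filtrados → Spec_encontrar_intervalo_maximo dados_filtrados (encontrar_intervalo_maximo dados_filtrados)

-- ===== LEMMAS AND PROOFS =====
-- Invariant: with B's previous zero at prev and the prefix length being n, A's current
-- counter equals n - prev - 1; both maxima coincide.
theorem pv_key (l : List String) : ∀ (n prev m : Int),
    ((pvZerosFrom n l).foldl (fun (s : Int × Int) p => (max s.1 (p - s.2 - 1), p)) (m, prev)).1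
    = (l.foldl (fun (s : Int × Int) dado =>
        if dado = "0" then (0, if s.1 > s.2 then s.1 else s.2)
        else (s.1 + 1, s.2)) (n - prev - 1, m)).2 := by
  induction l with
  | nil => intro n prev m; simp [pvZerosFrom]
  | cons d t ih =>
    intro n prev m
    by_cases hd : d = "0"
    · simp only [pvZerosFrom, hd, if_true, List.foldl_cons]
      rw [ih (n + 1) n (max m (n - prev - 1))]
      have : max m (n - prev - 1) = if n - prev - 1 > m then n - prev - 1 else m := by
        split_ifs with h <;> omega
      rw [this]
      ring_nf
    · simp only [pvZerosFrom, hd, if_false, List.foldl_cons]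
      rw [ih (n + 1) prev m]
      ring_nf

-- ===== VERDICT (by name: the statement is the Claim_ definition above) =====
theorem encontrar_intervalo_maximo_spec : Claim_equal_encontrar_intervalo_maximo := by
  intro l _
  unfold Spec_encontrar_intervalo_maximo encontrar_intervalo_maximo encontrar_intervalo_maximo_alt
  rw [pv_key l 0 (-1) 0]
  norm_num
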